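-- pv_equiv track=rewrite | github.com/kodareef5/sha256-probe | q5_alternative_attacks/diff_propagation.py | _pairs_to_diff
-- ===== SOURCE A (Python) =====
-- DIFF_VALS = {
--     '?': [(0,0), (0,1), (1,0), (1,1)],  # anything
--     '=': [(0,0), (1,1)],                  # equal
--     'x': [(0,1), (1,0)],                  # different
--     '0': [(0,0)],                          # both zero
--     '1': [(1,1)],                          # both one
--     'u': [(1,0)],                          # first=1, second=0
--     'n': [(0,1)],                          # first=0, second=1
-- }
--
-- def _pairs_to_diff(pairs):
--     """Convert a set of (v1,v2) pairs to the tightest signed diff symbol."""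
--     pairs = frozenset(pairs)
--     for sym, vals in DIFF_VALS.items():
--         if sym == '?':
--             continue
--         if pairs == frozenset(vals):
--             return sym
--     # Check if it's a subset of a known symbol
--     for sym in ['=', 'x', '0', '1', 'u', 'n']:
--         if pairs.issubset(frozenset(DIFF_VALS[sym])):
--             return sym
--     return '?'
-- ===== SOURCE B (Python) =====
-- # B: replace the two scanning loops (exact-match scan, then subset scan) by a single
-- # precomputed frozenset->symbol table lookup (simpler/idiomatic; same behaviour).
-- _LOOKUP = {
--     frozenset(): '=',
--     frozenset({(0, 0), (1, 1)}): '=',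
--     frozenset({(0, 1), (1, 0)}): 'x',
--     frozenset({(0, 0)}): '0',
--     frozenset({(1, 1)}): '1',
--     frozenset({(1, 0)}): 'u',
--     frozenset({(0, 1)}): 'n',
-- }
--
-- def _pairs_to_diff(pairs):
--     """Convert a set of (v1,v2) pairs to the tightest signed diff symbol."""
--     return _LOOKUP.get(frozenset(pairs), '?')
-- ===== Notes on version B (the rewrite author's own statement) =====
-- stated objective: simpler
-- what changed: Replaced A's two sequential scans (an exact-match scan over DIFF_VALS, then a subset-containment scan) with a single lookup of frozenset(pairs) in a precomputed frozenset-to-symbol table covering all seven matchable patterns.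
import Mathlib
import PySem

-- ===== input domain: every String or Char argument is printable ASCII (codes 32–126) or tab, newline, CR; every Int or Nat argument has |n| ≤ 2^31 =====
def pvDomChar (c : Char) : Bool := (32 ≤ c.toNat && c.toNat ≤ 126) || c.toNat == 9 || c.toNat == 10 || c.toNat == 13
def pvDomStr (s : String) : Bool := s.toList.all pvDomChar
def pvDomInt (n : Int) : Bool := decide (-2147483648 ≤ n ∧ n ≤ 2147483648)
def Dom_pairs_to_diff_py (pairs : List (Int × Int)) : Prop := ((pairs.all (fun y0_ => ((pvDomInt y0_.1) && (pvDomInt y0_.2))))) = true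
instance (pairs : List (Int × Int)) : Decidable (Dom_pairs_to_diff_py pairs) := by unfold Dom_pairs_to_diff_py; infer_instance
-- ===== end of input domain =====

-- B replaces A's two scanning loops by a single lookup in a precomputed frozenset→symbol table (simpler).

-- ===== PORT A =====
-- DIFF_VALS: the module-level dict, as an association list in insertion order.
def DIFF_VALS : List (String × List (Int × Int)) :=
  [("?", [(0, 0), (0, 1), (1, 0), (1, 1)]),
   ("=", [(0, 0), (1, 1)]),
   ("x", [(0, 1), (1, 0)]),
   ("0", [(0, 0)]),
   ("1", [(1, 1)]),
   ("u", [(1, 0)]),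
   ("n", [(0, 1)])]

-- first loop: 'for sym, vals in DIFF_VALS.items(): …' (early return as Option)
def pairs_to_diff_loop1 (s : PySem.Set (Int × Int)) : List (String × List (Int × Int)) → Option String
  | [] => none
  | (sym, vals) :: rest =>
      if sym == "?" then pairs_to_diff_loop1 s rest
      else if PySem.Set.equal s (PySem.Set.ofList vals) then some sym
      else pairs_to_diff_loop1 s rest

-- DIFF_VALS[sym]: dict indexing = first match (every sym used is a key, so KeyError is unreachable)
def DIFF_VALS_get (sym : String) : List (Int × Int) :=
  match DIFF_VALS.find? (fun p => p.1 == sym) with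
  | some p => p.2
  | none => []  -- unreachable (KeyError)

-- second loop: "for sym in ['=', 'x', '0', '1', 'u', 'n']: …"
def pairs_to_diff_loop2 (s : PySem.Set (Int × Int)) : List String → Option String
  | [] => none
  | sym :: rest =>
      if PySem.Set.issubset s (PySem.Set.ofList (DIFF_VALS_get sym)) then some sym
      else pairs_to_diff_loop2 s rest

def pairs_to_diff_py (pairs : List (Int × Int)) : String :=
  let s := PySem.Set.ofList pairs
  match pairs_to_diff_loop1 s DIFF_VALS with
  | some r => r
  | none =>
    match pairs_to_diff_loop2 s ["=", "x", "0", "1", "u", "n"] with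
    | some r => r
    | none => "?"

-- ===== PORT B =====
-- _LOOKUP: a dict keyed by frozensets; ported by hand as an association list whose lookup
-- compares keys with Set.equal (exact: frozenset equality IS set equality, and dict lookup
-- returns the value of the unique equal key or the default).
def LOOKUP : List (PySem.Set (Int × Int) × String) :=
  [(PySem.Set.ofList [], "="),
   (PySem.Set.ofList [(0, 0), (1, 1)], "="),
   (PySem.Set.ofList [(0, 1), (1, 0)], "x"),
   (PySem.Set.ofList [(0, 0)], "0"),
   (PySem.Set.ofList [(1, 1)], "1"),
   (PySem.Set.ofList [(1, 0)], "u"),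
   (PySem.Set.ofList [(0, 1)], "n")]

-- _LOOKUP.get(probe, dflt)
def lookup_get (probe : PySem.Set (Int × Int)) (dflt : String) : List (PySem.Set (Int × Int) × String) → String
  | [] => dflt
  | (k, v) :: rest => if PySem.Set.equal probe k then v else lookup_get probe dflt rest

def pairs_to_diff_py_alt (pairs : List (Int × Int)) : String :=
  lookup_get (PySem.Set.ofList pairs) "?" LOOKUP

-- ===== PRECONDITION & SPEC =====
def Spec_pairs_to_diff_py (pairs : List (Int × Int)) (out : String) : Prop := out = pairs_to_diff_py_alt pairs
instance (pairs : List (Int × Int)) (out : String) : Decidable (Spec_pairs_to_diff_py pairs out) := by unfold Spec_pairs_to_diff_py; infer_instance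

-- ===== CLAIM (what is proved, stated in full; the proofs are below) =====
def Claim_equal_pairs_to_diff_py : Prop := ∀ (pairs : List (Int × Int)), Dom_pairs_to_diff_py pairs → Spec_pairs_to_diff_py pairs (pairs_to_diff_py pairs)

-- ===== LEMMAS AND PROOFS =====

def pvU4 : List (Int × Int) := [(0,0),(0,1),(1,0),(1,1)]

lemma subset_split (pairs T C : List (Int × Int)) (hT : ∀ x ∈ T, x ∈ pvU4) (hU : ∀ x ∈ pvU4, x ∈ T ∨ x ∈ C) (hTC : ∀ x ∈ C, x ∉ T) :
    (∀ p ∈ pairs, p ∈ T) ↔ (∀ p ∈ pairs, p ∈ pvU4) ∧ (∀ c ∈ C, c ∉ pairs) := by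
  constructor
  · intro h
    exact ⟨fun p hp => hT p (h p hp), fun c hcC hcp => hTC c hcC (h c hcp)⟩
  · rintro ⟨h1, h2⟩ p hp
    rcases hU p (h1 p hp) with h | h
    · exact h
    · exact absurd hp (h2 p h)

lemma issubset_char (pairs T C : List (Int × Int)) (hT : ∀ x ∈ T, x ∈ pvU4) (hU : ∀ x ∈ pvU4, x ∈ T ∨ x ∈ C) (hTC : ∀ x ∈ C, x ∉ T) :
    PySem.Set.issubset (PySem.Set.ofList pairs) (PySem.Set.ofList T) = true ↔
      (∀ p ∈ pairs, p ∈ pvU4) ∧ (∀ c ∈ C, c ∉ pairs) := by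
  rw [PySem.Set.issubset_iff, ← subset_split pairs T C hT hU hTC]
  simp [PySem.Set.mem_ofList]

lemma equal_char (pairs T C : List (Int × Int)) (hT : ∀ x ∈ T, x ∈ pvU4) (hU : ∀ x ∈ pvU4, x ∈ T ∨ x ∈ C) (hTC : ∀ x ∈ C, x ∉ T) :
    PySem.Set.equal (PySem.Set.ofList pairs) (PySem.Set.ofList T) = true ↔
      ((∀ p ∈ pairs, p ∈ pvU4) ∧ (∀ c ∈ C, c ∉ pairs)) ∧ (∀ t ∈ T, t ∈ pairs) := by
  rw [PySem.Set.equal_iff]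
  simp only [PySem.Set.mem_ofList]
  constructor
  · intro h
    exact ⟨(subset_split pairs T C hT hU hTC).1 (fun p hp => (h p).1 hp), fun t ht => (h t).2 ht⟩
  · rintro ⟨hs, ht⟩ x
    exact ⟨fun hx => ((subset_split pairs T C hT hU hTC).2 hs) x hx, fun hx => ht x hx⟩

theorem main_eq (pairs : List (Int × Int)) : pairs_to_diff_py pairs = pairs_to_diff_py_alt pairs := by
  have hE1 := equal_char pairs [(0,0),(1,1)] [(0,1),(1,0)] (by decide) (by decide) (by decide)
  have hE2 := equal_char pairs [(0,1),(1,0)] [(0,0),(1,1)] (by decide) (by decide) (by decide)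
  have hE3 := equal_char pairs [(0,0)] [(0,1),(1,0),(1,1)] (by decide) (by decide) (by decide)
  have hE4 := equal_char pairs [(1,1)] [(0,0),(0,1),(1,0)] (by decide) (by decide) (by decide)
  have hE5 := equal_char pairs [(1,0)] [(0,0),(0,1),(1,1)] (by decide) (by decide) (by decide)
  have hE6 := equal_char pairs [(0,1)] [(0,0),(1,0),(1,1)] (by decide) (by decide) (by decide)
  have hE0 := equal_char pairs [] pvU4 (by decide) (by decide) (by decide)
  have hS1 := issubset_char pairs [(0,0),(1,1)] [(0,1),(1,0)] (by decide) (by decide) (by decide)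
  have hS2 := issubset_char pairs [(0,1),(1,0)] [(0,0),(1,1)] (by decide) (by decide) (by decide)
  have hS3 := issubset_char pairs [(0,0)] [(0,1),(1,0),(1,1)] (by decide) (by decide) (by decide)
  have hS4 := issubset_char pairs [(1,1)] [(0,0),(0,1),(1,0)] (by decide) (by decide) (by decide)
  have hS5 := issubset_char pairs [(1,0)] [(0,0),(0,1),(1,1)] (by decide) (by decide) (by decide)
  have hS6 := issubset_char pairs [(0,1)] [(0,0),(1,0),(1,1)] (by decide) (by decide) (by decide)
  simp only [pairs_to_diff_py, pairs_to_diff_py_alt, pairs_to_diff_loop1, pairs_to_diff_loop2,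
    lookup_get, DIFF_VALS, LOOKUP, DIFF_VALS_get, List.find?, String.reduceBEq, if_false, if_true,
    Bool.false_eq_true]
  simp only [hE1, hE2, hE3, hE4, hE5, hE6, hE0, hS1, hS2, hS3, hS4, hS5, hS6]
  by_cases ha : ((0,0) : Int × Int) ∈ pairs <;>
    by_cases hb : ((0,1) : Int × Int) ∈ pairs <;>
      by_cases hc : ((1,0) : Int × Int) ∈ pairs <;>
        by_cases hd : ((1,1) : Int × Int) ∈ pairs <;>
          by_cases hq : ∀ p ∈ pairs, p ∈ pvU4 <;>
            first
              | (simp only [iff_false_intro hq]; simp [pvU4, ha, hb, hc, hd])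
              | (simp only [iff_true_intro hq]; simp [pvU4, ha, hb, hc, hd])

-- ===== VERDICT (by name: the statement is the Claim_ definition above) =====
theorem pairs_to_diff_py_spec : Claim_equal_pairs_to_diff_py := by
  intro pairs _
  exact main_eq pairs
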